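-- pv_equiv track=rewrite | github.com/RajputVikashS5/Elixi-AI | python-core/automation/coding_assistant.py | _extract_improvements_from_response
-- ===== SOURCE A (Python) =====
-- from typing import Any, Dict, Optional, List
--
-- def _extract_improvements_from_response(response: str) -> List[Dict]:
--     """Extract improvements from refactoring response."""
--     improvements = []
--     lines = response.split('\n')
--     current_improvement = None
--
--     for line in lines:
--         line = line.strip()
--         if line.startswith(('1.', '2.', '3.', '-', '*')):
--             if current_improvement:
--                 improvements.append(current_improvement)
--             current_improvement = {'description': line.lstrip('0123456789.-* ')}
--         elif current_improvement and line:
--             current_improvement['reason'] = line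
--
--     if current_improvement:
--         improvements.append(current_improvement)
--
--     return improvements if improvements else [{'description': response}]
-- ===== SOURCE B (Python) =====
-- from typing import Any, Dict, Optional, List
--
-- _BULLETS = ('1.', '2.', '3.', '-', '*')
--
-- def _extract_improvements_from_response(response: str) -> List[Dict]:
--     """Single right-to-left pass: meet each group's trailing reason line
--     before its bullet, so no mutable 'current' dict is needed."""
--     result = []
--     pending = None  # last non-empty line seen below the next bullet above it
--     for line in reversed(response.split('\n')):
--         line = line.strip()
--         if line.startswith(_BULLETS):
--             item = {'description': line.lstrip('0123456789.-* ')}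
--             if pending is not None:
--                 item['reason'] = pending
--             result.append(item)
--             pending = None
--         elif line and pending is None:
--             pending = line
--     result.reverse()
--     return result or [{'description': response}]
-- ===== Notes on version B (the rewrite author's own statement) =====
-- stated objective: alternative
-- what changed: Replaces A's forward scan that mutates an in-progress item dict (overwriting its reason on every non-empty line) by a single right-to-left pass that sees each group's last non-empty line before its bullet, so each item dict is built once and complete.
import Mathlib
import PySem

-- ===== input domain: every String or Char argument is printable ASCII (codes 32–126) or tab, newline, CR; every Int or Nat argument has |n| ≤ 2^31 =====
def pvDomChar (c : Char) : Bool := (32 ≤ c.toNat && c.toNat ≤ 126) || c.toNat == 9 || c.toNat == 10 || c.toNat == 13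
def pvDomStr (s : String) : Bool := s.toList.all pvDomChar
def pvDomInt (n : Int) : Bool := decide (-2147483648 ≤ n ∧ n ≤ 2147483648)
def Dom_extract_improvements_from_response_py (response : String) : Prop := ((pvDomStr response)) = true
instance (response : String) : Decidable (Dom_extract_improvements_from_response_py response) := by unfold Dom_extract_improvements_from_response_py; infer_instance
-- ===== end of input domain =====

-- B replaces A's forward scan with an in-place-mutated item dict by one right-to-left pass
-- that meets each group's trailing reason line before its bullet (objective: alternative).

-- shared stand-in for the library call str.lstrip(chars): drop leading chars in `chars`
def pvLstripChars (s : String) (chars : String) : String :=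
  String.ofList (s.toList.dropWhile (fun c => c ∈ chars.toList))

-- ===== PORT A =====
def extract_improvements_from_response_py (response : String) : List (List (String × String)) :=
  let lines := (PySem.Str.split? response "\n").getD []
  let st := lines.foldl
    (fun (st : List (PySem.Dict String String) × Option (PySem.Dict String String)) line =>
      let line := PySem.Str.strip line
      if PySem.Str.startswith line "1." || PySem.Str.startswith line "2." ||
         PySem.Str.startswith line "3." || PySem.Str.startswith line "-" ||
         PySem.Str.startswith line "*" then
        ((match st.2 with | some c => st.1 ++ [c] | none => st.1),
         some (PySem.Dict.empty.insert "description" (pvLstripChars line "0123456789.-* ")))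
      else
        match st.2 with
        | some c => if line ≠ "" then (st.1, some (c.insert "reason" line)) else st
        | none => st)
    ([], none)
  let improvements := match st.2 with | some c => st.1 ++ [c] | none => st.1
  if improvements.isEmpty then [[("description", response)]]
  else improvements.map PySem.Dict.items

-- ===== PORT B =====
def pvBulletsB : List String := ["1.", "2.", "3.", "-", "*"]

def pvIsBulletB (t : String) : Bool := pvBulletsB.any (fun p => PySem.Str.startswith t p)

def extract_improvements_from_response_py_alt (response : String) : List (List (String × String)) :=
  let st := ((PySem.Str.split? response "\n").getD []).foldr
    (fun line (st : List (List (String × String)) × Option String) =>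
      let t := PySem.Str.strip line
      if pvIsBulletB t then
        (st.1 ++ [[("description", pvLstripChars t "0123456789.-* ")] ++
           (match st.2 with | some r => [("reason", r)] | none => [])], none)
      else if t ≠ "" && st.2.isNone then (st.1, some t)
      else st)
    ([], none)
  if st.1.isEmpty then [[("description", response)]] else st.1.reverse

-- ===== PRECONDITION & SPEC =====
def Spec_extract_improvements_from_response_py (response : String) (out : List (List (String × String))) : Prop := out = extract_improvements_from_response_py_alt response
instance (response : String) (out : List (List (String × String))) : Decidable (Spec_extract_improvements_from_response_py response out) := by unfold Spec_extract_improvements_from_response_py; infer_instance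

-- ===== CLAIM (what is proved, stated in full; the proofs are below) =====
def Claim_equal_extract_improvements_from_response_py : Prop := ∀ (response : String), Dom_extract_improvements_from_response_py response → Spec_extract_improvements_from_response_py response (extract_improvements_from_response_py response)

-- ===== LEMMAS AND PROOFS =====

-- rendered item: description plus optional reason
def pvMkItem (d : String) (r : Option String) : List (String × String) :=
  [("description", d)] ++ (match r with | some r => [("reason", r)] | none => [])

-- the dict A's loop carries, abstracted as (description, optional reason)
def pvAbsD (x : String × Option String) : PySem.Dict String String :=
  match x.2 with
  | none => PySem.Dict.empty.insert "description" x.1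
  | some r => (PySem.Dict.empty.insert "description" x.1).insert "reason" r

def pvLstripB (t : String) : String := pvLstripChars t "0123456789.-* "

-- reference for A's loop, over already-stripped lines, finalized (cur appended)
def pvRunA : List String → Option (String × Option String) → List (String × Option String)
  | [], c => match c with | some x => [x] | none => []
  | t :: ss, c =>
    if pvIsBulletB t then
      (match c with | some x => [x] | none => []) ++ pvRunA ss (some (pvLstripB t, none))
    else if t ≠ "" then pvRunA ss (c.map (fun x => (x.1, some t)))
    else pvRunA ss c

-- reference for B's loop, over already-stripped lines, cons version
def pvRunB : List String → List (List (String × String)) × Option String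
  | [] => ([], none)
  | t :: ss =>
    let st := pvRunB ss
    if pvIsBulletB t then (pvMkItem (pvLstripB t) st.2 :: st.1, none)
    else if t ≠ "" && st.2.isNone then (st.1, some t)
    else st

theorem pvItems_absD (x : String × Option String) :
    (pvAbsD x).items = pvMkItem x.1 x.2 := by
  obtain ⟨d, r⟩ := x
  cases r <;> simp [pvAbsD, pvMkItem, PySem.Dict.empty, PySem.Dict.insert]

theorem pvInsert_reason_absD (x : String × Option String) (t : String) :
    (pvAbsD x).insert "reason" t = pvAbsD (x.1, some t) := by
  obtain ⟨d, r⟩ := x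
  cases r with
  | none => rfl
  | some r0 => exact PySem.Dict.insert_insert_self ..

-- A's foldl (over raw lines, stripping inside), with generalized accumulator and
-- abstract current item, finalizes to the reference pvRunA on the stripped lines.
theorem pvFoldA_eq_runA (ls : List String)
    (acc : List (PySem.Dict String String)) (c : Option (String × Option String)) :
    (let st := ls.foldl
      (fun (st : List (PySem.Dict String String) × Option (PySem.Dict String String)) line =>
        let line := PySem.Str.strip line
        if PySem.Str.startswith line "1." || PySem.Str.startswith line "2." ||
           PySem.Str.startswith line "3." || PySem.Str.startswith line "-" ||
           PySem.Str.startswith line "*" then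
          ((match st.2 with | some c => st.1 ++ [c] | none => st.1),
           some (PySem.Dict.empty.insert "description" (pvLstripChars line "0123456789.-* ")))
        else
          match st.2 with
          | some c => if line ≠ "" then (st.1, some (c.insert "reason" line)) else st
          | none => st)
      (acc, c.map pvAbsD)
     match st.2 with | some d => st.1 ++ [d] | none => st.1) =
    acc ++ (pvRunA (ls.map PySem.Str.strip) c).map pvAbsD := by
  induction ls generalizing acc c with
  | nil => cases c <;> simp [pvRunA]
  | cons l ls ih =>
    simp only [List.foldl_cons, List.map_cons]
    rw [pvRunA.eq_def]
    simp only
    by_cases hb : pvIsBulletB (PySem.Str.strip l)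
    · have hb' : (PySem.Str.startswith (PySem.Str.strip l) "1." ||
          PySem.Str.startswith (PySem.Str.strip l) "2." ||
          PySem.Str.startswith (PySem.Str.strip l) "3." ||
          PySem.Str.startswith (PySem.Str.strip l) "-" ||
          PySem.Str.startswith (PySem.Str.strip l) "*") = true := by
        simpa [pvIsBulletB, pvBulletsB, Bool.or_assoc] using hb
      simp only [hb', if_pos, hb]
      cases c with
      | none =>
        simpa [pvAbsD, pvLstripB] using
          ih acc (some (pvLstripB (PySem.Str.strip l), none))
      | some x =>
        have := ih (acc ++ [pvAbsD x]) (some (pvLstripB (PySem.Str.strip l), none))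
        simpa [pvAbsD, pvLstripB, List.append_assoc] using this
    · have hb' : (PySem.Str.startswith (PySem.Str.strip l) "1." ||
          PySem.Str.startswith (PySem.Str.strip l) "2." ||
          PySem.Str.startswith (PySem.Str.strip l) "3." ||
          PySem.Str.startswith (PySem.Str.strip l) "-" ||
          PySem.Str.startswith (PySem.Str.strip l) "*") = false := by
        simpa [pvIsBulletB, pvBulletsB, Bool.or_assoc] using hb
      simp only [hb', Bool.false_eq_true, if_false, hb]
      by_cases he : PySem.Str.strip l = ""
      · simp only [he, ne_eq, not_true_eq_false, if_false]
        cases c with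
        | none => simpa using ih acc none
        | some x => simpa [he] using ih acc (some x)
      · simp only [he, ne_eq, not_false_eq_true, if_true]
        cases c with
        | none => simpa using ih acc none
        | some x =>
          have := ih acc (some (x.1, some (PySem.Str.strip l)))
          simpa [he, pvInsert_reason_absD] using this

-- B's foldr (over raw lines, stripping inside) equals the reference pvRunB on the
-- stripped lines, with the accumulated list reversed.
theorem pvFoldB_eq_runB (ls : List String) :
    ls.foldr
      (fun line (st : List (List (String × String)) × Option String) =>
        let t := PySem.Str.strip line
        if pvIsBulletB t then
          (st.1 ++ [[("description", pvLstripChars t "0123456789.-* ")] ++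
             (match st.2 with | some r => [("reason", r)] | none => [])], none)
        else if t ≠ "" && st.2.isNone then (st.1, some t)
        else st)
      ([], none) =
    (((pvRunB (ls.map PySem.Str.strip)).1).reverse, (pvRunB (ls.map PySem.Str.strip)).2) := by
  induction ls with
  | nil => simp [pvRunB]
  | cons l ls ih =>
    simp only [List.foldr_cons, List.map_cons, ih, pvRunB]
    by_cases hb : pvIsBulletB (PySem.Str.strip l)
    · simp [hb, pvMkItem, pvLstripB]
    · by_cases he : PySem.Str.strip l = ""
      · rw [he] at hb
        simp [hb, he]
      · cases hp : (pvRunB (ls.map PySem.Str.strip)).2 <;> simp [hb, he, hp]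

-- core correspondence between the two references
theorem pvRunA_eq_runB (ss : List String) (c : Option (String × Option String)) :
    (pvRunA ss c).map (fun x => pvMkItem x.1 x.2) =
      (match c with
       | none => (pvRunB ss).1
       | some x => pvMkItem x.1 ((pvRunB ss).2.or x.2) :: (pvRunB ss).1) := by
  induction ss generalizing c with
  | nil => cases c with
    | none => simp [pvRunA, pvRunB]
    | some x => simp [pvRunA, pvRunB, Option.or]
  | cons t ss ih =>
    rw [pvRunA.eq_def, pvRunB]
    simp only
    by_cases hb : pvIsBulletB t
    · cases c <;> cases h2 : (pvRunB ss).2 <;> simp [hb, ih, Option.or, h2]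
    · by_cases he : t = ""
      · rw [he] at hb
        cases c <;> simp [hb, he, ih]
      · cases h2 : (pvRunB ss).2 <;> cases c <;> simp [hb, he, ih, h2, Option.or]

-- ===== VERDICT (by name: the statement is the Claim_ definition above) =====
theorem extract_improvements_from_response_py_spec : Claim_equal_extract_improvements_from_response_py := by
  intro response _
  unfold Spec_extract_improvements_from_response_py
  simp only [extract_improvements_from_response_py, extract_improvements_from_response_py_alt]
  have hA := pvFoldA_eq_runA ((PySem.Str.split? response "\n").getD []) [] none
  have hB := pvFoldB_eq_runB ((PySem.Str.split? response "\n").getD [])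
  set ss := ((PySem.Str.split? response "\n").getD []).map PySem.Str.strip with hss
  have hAB := pvRunA_eq_runB ss none
  simp only [Option.map_none] at hA
  rw [hA, hB]
  simp only [List.nil_append]
  rcases hE : (pvRunB ss).1 with _ | ⟨it, rest⟩
  · have : pvRunA ss none = [] := by
      have := hAB
      rw [hE] at this
      simpa using this
    simp [this]
  · have hne : (pvRunA ss none).map pvAbsD ≠ [] := by
      intro h
      have h0 : pvRunA ss none = [] := by simpa using h
      rw [h0] at hAB
      simp [hE] at hAB
    have hmap : ((pvRunA ss none).map pvAbsD).map PySem.Dict.items = (pvRunB ss).1 := by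
      rw [List.map_map]
      have : (PySem.Dict.items ∘ pvAbsD) = fun x : String × Option String => pvMkItem x.1 x.2 := by
        funext x; exact pvItems_absD x
      rw [this, hAB]
    simp only [List.isEmpty_iff, hne, if_false]
    rw [hE] at hmap
    simpa [hE] using hmap
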